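-- pv_equiv track=rewrite | github.com/SemihAltintasPXL/PXLToegepast-Informatica | Vakken_eerste_jaar/IT-Essentials/IT-Essentials-oefeningen/7_lists/Voorbeelden/Opgave_7.7.py | verschil_hartslag
-- ===== SOURCE A (Python) =====
-- def verschil_hartslag(lijst):  # per deelnemer verschil tussen hoogste en laagste
--     verschil_lijst = []
--     for j in range(len(lijst[0])):  # of range(aantal_deelnemers(lijst)
--         hoogste = lijst[0][j]  # initialiseren op de eerste element in de kolom
--         laagste = lijst[0][j]
--         for i in range(1, len(lijst)):
--             if lijst[i][j] > hoogste:
--                 hoogste = lijst[i][j]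
--             elif lijst[i][j] < laagste:
--                 laagste = lijst[i][j]
--
--         verschil = hoogste - laagste
--         verschil_lijst.append(verschil)
--     return verschil_lijst
-- ===== SOURCE B (Python) =====
-- def verschil_hartslag(lijst):  # per column: sort the column, then last element minus first
--     resultaat = []
--     for j in range(len(lijst[0])):
--         kolom = sorted(rij[j] for rij in lijst)
--         resultaat.append(kolom[-1] - kolom[0])
--     return resultaat
-- ===== Notes on version B (the rewrite author's own statement) =====
-- stated objective: alternative
-- what changed: Replaces A's combined running max/min scan over row indices with sorting each column and taking last element minus first element.
import Mathlib
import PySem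

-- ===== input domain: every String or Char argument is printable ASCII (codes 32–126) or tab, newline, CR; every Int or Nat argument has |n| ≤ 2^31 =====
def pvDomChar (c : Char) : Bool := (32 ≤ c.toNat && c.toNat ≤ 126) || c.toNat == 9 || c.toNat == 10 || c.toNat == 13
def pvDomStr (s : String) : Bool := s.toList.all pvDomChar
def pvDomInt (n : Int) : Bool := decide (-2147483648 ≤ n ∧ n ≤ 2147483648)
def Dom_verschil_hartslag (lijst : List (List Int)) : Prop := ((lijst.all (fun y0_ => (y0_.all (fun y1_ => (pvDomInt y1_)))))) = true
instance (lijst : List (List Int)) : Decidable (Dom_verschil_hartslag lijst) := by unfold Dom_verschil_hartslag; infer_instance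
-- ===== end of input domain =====

-- B sorts each column and takes last-minus-first element, instead of A's combined running
-- max/min scan over row indices (alternative algorithm, same result).

-- ===== PORT A =====
def verschil_hartslag (lijst : List (List Int)) : List Int :=
  (PySem.List.pyRange 0 (PySem.List.len (PySem.List.pyGetD lijst 0 []))).foldl
    (fun verschil_lijst j =>
      let start := PySem.List.pyGetD (PySem.List.pyGetD lijst 0 []) j 0
      let hl := (PySem.List.pyRange 1 (PySem.List.len lijst)).foldl
        (fun (hl : Int × Int) i =>
          let x := PySem.List.pyGetD (PySem.List.pyGetD lijst i []) j 0
          if x > hl.1 then (x, hl.2) else if x < hl.2 then (hl.1, x) else hl)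
        (start, start)
      verschil_lijst ++ [hl.1 - hl.2]) []

-- ===== PORT B =====
def verschil_hartslag_alt (lijst : List (List Int)) : List Int :=
  (PySem.List.pyRange 0 (PySem.List.len (PySem.List.pyGetD lijst 0 []))).foldl
    (fun resultaat j =>
      let kolom := PySem.List.sorted (lijst.map (fun rij => PySem.List.pyGetD rij j 0)) (fun y => y) false
      resultaat ++ [PySem.List.pyGetD kolom (-1) 0 - PySem.List.pyGetD kolom 0 0]) []

-- ===== PRECONDITION & SPEC =====
-- Pre_ excludes exactly the inputs on which the Python A raises IndexError:
-- the empty list, and lists with some row shorter than row 0 (B raises there too).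
def Pre_verschil_hartslag (lijst : List (List Int)) : Prop :=
  lijst ≠ [] ∧ ∀ r ∈ lijst, (lijst.headD []).length ≤ r.length
instance (lijst : List (List Int)) : Decidable (Pre_verschil_hartslag lijst) := by
  unfold Pre_verschil_hartslag; infer_instance

def pvWitness_verschil_hartslag : List (List Int) := [[60, 80], [70, 65]]

def Spec_verschil_hartslag (lijst : List (List Int)) (out : List Int) : Prop := out = verschil_hartslag_alt lijst
instance (lijst : List (List Int)) (out : List Int) : Decidable (Spec_verschil_hartslag lijst out) := by unfold Spec_verschil_hartslag; infer_instance

-- ===== CLAIM (what is proved, stated in full; the proofs are below) =====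
def Claim_equal_verschil_hartslag : Prop := ∀ (lijst : List (List Int)), Dom_verschil_hartslag lijst → Pre_verschil_hartslag lijst → Spec_verschil_hartslag lijst (verschil_hartslag lijst)

-- ===== LEMMAS AND PROOFS =====

-- A's combined if/elif running max-min scan computes (foldl max, foldl min)
lemma foldl_maxmin {α : Type} (f : α → Int) (ys : List α) : ∀ h l : Int, l ≤ h →
    ys.foldl (fun (hl : Int × Int) r =>
      if f r > hl.1 then (f r, hl.2) else if f r < hl.2 then (hl.1, f r) else hl) (h, l)
    = ((ys.map f).foldl max h, (ys.map f).foldl min l) := by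
  induction ys with
  | nil => intro h l _; rfl
  | cons x t ih =>
    intro h l hlh
    simp only [List.foldl_cons, List.map_cons]
    split_ifs with h1 h2
    · rw [show max h (f x) = f x by omega, show min l (f x) = l by omega]
      exact ih (f x) l (by omega)
    · rw [show max h (f x) = h by omega, show min l (f x) = f x by omega]
      exact ih h (f x) (by omega)
    · rw [show max h (f x) = h by omega, show min l (f x) = l by omega]
      exact ih h l hlh

-- sorted column: first element is the running minimum, last element is the running maximum
lemma sorted_last_sub_head (x : Int) (ys : List Int) :
    PySem.List.pyGetD (PySem.List.sorted (x :: ys) (fun y => y) false) (-1) 0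
      - PySem.List.pyGetD (PySem.List.sorted (x :: ys) (fun y => y) false) 0 0
    = ys.foldl max x - ys.foldl min x := by
  have hmin := PySem.List.min?_id_cons x ys
  have hmax := PySem.List.max?_id_cons x ys
  have hminmem : ys.foldl min x ∈ x :: ys := PySem.List.min?_mem hmin
  have hmaxmem : ys.foldl max x ∈ x :: ys := PySem.List.max?_mem hmax
  have hminlb : ∀ y ∈ x :: ys, ys.foldl min x ≤ y := PySem.List.min?_isMin hmin
  have hmaxub : ∀ y ∈ x :: ys, y ≤ ys.foldl max x := PySem.List.max?_isMax hmax
  obtain ⟨m, t, hm⟩ : ∃ m t, PySem.List.sorted (x :: ys) (fun y => y) false = m :: t := by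
    cases h : PySem.List.sorted (x :: ys) (fun y => y) false with
    | nil => exact absurd ((PySem.List.sorted_eq_nil_iff _ _ _).mp h) (by simp)
    | cons a b => exact ⟨a, b, rfl⟩
  have hmem_iff : ∀ y, y ∈ m :: t ↔ y ∈ x :: ys := by
    intro y; rw [← hm]; exact PySem.List.mem_sorted _ _ _ y
  have hhead : ∀ y ∈ x :: ys, m ≤ y :=
    PySem.List.key_head_sorted_le (x :: ys) (fun y => y) hm
  have hmmem : m ∈ x :: ys := (hmem_iff m).mp List.mem_cons_self
  have hhead_eq : m = ys.foldl min x :=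
    le_antisymm (hhead _ hminmem) (hminlb _ hmmem)
  obtain ⟨p, hp, hpe⟩ := List.mem_iff_getElem.mp ((hmem_iff _).mpr hmaxmem)
  have hmono := PySem.List.sorted_id_getElem_mono (x :: ys)
    (p := p) (q := (m :: t).length - 1)
    (by simp at hp ⊢; omega) (by rw [hm]; simp)
  simp only [hm] at hmono
  have hLmem : (m :: t).getLast (List.cons_ne_nil m t) ∈ x :: ys :=
    (hmem_iff _).mp (List.getLast_mem (List.cons_ne_nil m t))
  have hL_eq : (m :: t).getLast (List.cons_ne_nil m t) = ys.foldl max x := by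
    refine le_antisymm (hmaxub _ hLmem) ?_
    rw [List.getLast_eq_getElem]
    calc ys.foldl max x = (m :: t)[p] := hpe.symm
      _ ≤ (m :: t)[(m :: t).length - 1] := hmono
  rw [hm, PySem.List.pyGetD_neg_one (m :: t) 0 (List.cons_ne_nil m t),
    PySem.List.pyGetD_zero_cons, hL_eq, hhead_eq]

-- ===== VERDICT (by name: the statement is the Claim_ definition above) =====
theorem verschil_hartslag_spec : Claim_equal_verschil_hartslag := by
  intro lijst _ hpre
  obtain ⟨hne, hall⟩ := hpre
  unfold Spec_verschil_hartslag verschil_hartslag verschil_hartslag_alt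
  match lijst, hne with
  | r0 :: rest, _ =>
    rw [PySem.List.foldl_append_singleton_eq_map, PySem.List.foldl_append_singleton_eq_map]
    apply congrArg
    apply List.map_congr_left
    intro j hj
    simp only [PySem.List.pyGetD_zero_cons, PySem.List.len_eq] at *
    -- inner loop over rows 1.. = fold over `rest`
    rw [PySem.List.foldl_pyRange_pyGetD' (r0 :: rest) []
      (fun (hl : Int × Int) r =>
        if PySem.List.pyGetD r j 0 > hl.1 then (PySem.List.pyGetD r j 0, hl.2)
        else if PySem.List.pyGetD r j 0 < hl.2 then (hl.1, PySem.List.pyGetD r j 0) else hl)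
      _ (by omega)]
    simp only [Int.toNat_one, List.drop_succ_cons, List.drop_zero]
    rw [foldl_maxmin (fun r => PySem.List.pyGetD r j 0) rest _ _ le_rfl]
    have : (r0 :: rest).map (fun rij => PySem.List.pyGetD rij j 0)
        = PySem.List.pyGetD r0 j 0 :: rest.map (fun rij => PySem.List.pyGetD rij j 0) := rfl
    rw [this, sorted_last_sub_head]
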